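-- pv_equiv track=rewrite | github.com/icdev-ai/icdev | tools/compliance/cmmc_report_generator.py | _build_gate_details
-- ===== SOURCE A (Python) =====
-- def _build_gate_details(assessments, level, gate_result):
--     """Build gate evaluation detail paragraph."""
--     not_met = [a for a in assessments if a.get("status") == "not_met"]
--     partially_met = [a for a in assessments if a.get("status") == "partially_met"]
--     not_assessed = [a for a in assessments if a.get("status") == "not_assessed"]
--
--     lines = []
--     if gate_result == "PASS":
--         lines.append(
--             f"All CMMC Level {level} practices are either met, partially met, "
--             "not applicable, or not yet assessed. The system meets the minimum "
--             "gate criteria for CMMC certification readiness."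
--         )
--     else:
--         lines.append(
--             f"**{len(not_met)} practice(s) have a status of not_met.** "
--             "These must be remediated before CMMC certification can proceed."
--         )
--
--     if partially_met:
--         lines.append(
--             f"\n**Note:** {len(partially_met)} practice(s) are partially met. "
--             "While these do not block the gate, they should be fully implemented "
--             "prior to formal C3PAO assessment."
--         )
--
--     if not_assessed:
--         lines.append(
--             f"\n**Note:** {len(not_assessed)} practice(s) have not been assessed. "
--             "All practices must be evaluated before requesting formal assessment."
--         )
--
--     return "\n".join(lines)
-- ===== SOURCE B (Python) =====
-- def _build_gate_details(assessments, level, gate_result):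
--     """Build gate evaluation detail paragraph (single-pass tally, direct string build)."""
--     nm = pm = na = 0
--     for a in assessments:
--         s = a.get("status")
--         if s == "not_met":
--             nm += 1
--         elif s == "partially_met":
--             pm += 1
--         elif s == "not_assessed":
--             na += 1
--
--     if gate_result == "PASS":
--         text = (
--             f"All CMMC Level {level} practices are either met, partially met, "
--             "not applicable, or not yet assessed. The system meets the minimum "
--             "gate criteria for CMMC certification readiness."
--         )
--     else:
--         text = (
--             f"**{nm} practice(s) have a status of not_met.** "
--             "These must be remediated before CMMC certification can proceed."
--         )
--
--     if pm:
--         text += (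
--             f"\n\n**Note:** {pm} practice(s) are partially met. "
--             "While these do not block the gate, they should be fully implemented "
--             "prior to formal C3PAO assessment."
--         )
--
--     if na:
--         text += (
--             f"\n\n**Note:** {na} practice(s) have not been assessed. "
--             "All practices must be evaluated before requesting formal assessment."
--         )
--
--     return text
-- ===== Notes on version B (the rewrite author's own statement) =====
-- stated objective: simpler
-- what changed: A filters the assessment list three times and joins a list of lines; B tallies the three status counts in one pass over the list and builds the result string by direct appends.
import Mathlib
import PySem

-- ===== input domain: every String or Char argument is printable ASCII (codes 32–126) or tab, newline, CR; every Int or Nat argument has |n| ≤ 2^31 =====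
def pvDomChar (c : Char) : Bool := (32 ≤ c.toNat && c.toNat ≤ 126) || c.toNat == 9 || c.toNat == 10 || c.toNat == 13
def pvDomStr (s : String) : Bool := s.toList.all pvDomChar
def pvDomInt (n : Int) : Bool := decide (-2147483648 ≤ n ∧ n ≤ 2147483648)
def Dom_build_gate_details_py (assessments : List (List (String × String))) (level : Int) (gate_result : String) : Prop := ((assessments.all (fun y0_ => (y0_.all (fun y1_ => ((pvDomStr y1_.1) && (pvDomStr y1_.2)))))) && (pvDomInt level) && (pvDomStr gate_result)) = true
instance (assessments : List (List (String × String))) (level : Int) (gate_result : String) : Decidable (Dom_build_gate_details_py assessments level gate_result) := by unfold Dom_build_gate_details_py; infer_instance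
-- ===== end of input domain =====

-- B replaces A's three list-comprehension filter passes by a single-pass tally of the three
-- status counts and builds the result by direct string appends instead of a lines list + join
-- (objective: one pass instead of three; return value proved identical).

-- ===== PORT A =====
-- a.get("status") on the association-list dict (shared literally by both Pythons)
def bgdStatus (a : List (String × String)) : Option String :=
  PySem.Dict.get? (PySem.Dict.mk a) "status"

-- literal transliteration of A: three list-comprehension filters, a lines list, "\n".join
def build_gate_details_py (assessments : List (List (String × String))) (level : Int) (gate_result : String) : String :=
  let not_met := assessments.filter (fun a => bgdStatus a == some "not_met")
  let partially_met := assessments.filter (fun a => bgdStatus a == some "partially_met")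
  let not_assessed := assessments.filter (fun a => bgdStatus a == some "not_assessed")
  let lines : List String := []
  let lines := if gate_result == "PASS" then
      lines ++ ["All CMMC Level " ++ (PySem.Int.toStr level ++ " practices are either met, partially met, not applicable, or not yet assessed. The system meets the minimum gate criteria for CMMC certification readiness.")]
    else
      lines ++ ["**" ++ (PySem.Int.toStr (Int.ofNat not_met.length) ++ " practice(s) have a status of not_met.** These must be remediated before CMMC certification can proceed.")]
  let lines := if partially_met.isEmpty then lines
    else lines ++ ["\n**Note:** " ++ (PySem.Int.toStr (Int.ofNat partially_met.length) ++ " practice(s) are partially met. While these do not block the gate, they should be fully implemented prior to formal C3PAO assessment.")]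
  let lines := if not_assessed.isEmpty then lines
    else lines ++ ["\n**Note:** " ++ (PySem.Int.toStr (Int.ofNat not_assessed.length) ++ " practice(s) have not been assessed. All practices must be evaluated before requesting formal assessment.")]
  PySem.Str.join "\n" lines

-- ===== PORT B =====
-- B's single-pass tally step: one status lookup, if/elif/elif on it
def bgdTally (acc : Int × Int × Int) (a : List (String × String)) : Int × Int × Int :=
  let s := bgdStatus a
  if s == some "not_met" then (acc.1 + 1, acc.2.1, acc.2.2)
  else if s == some "partially_met" then (acc.1, acc.2.1 + 1, acc.2.2)
  else if s == some "not_assessed" then (acc.1, acc.2.1, acc.2.2 + 1)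
  else acc

def build_gate_details_py_alt (assessments : List (List (String × String))) (level : Int) (gate_result : String) : String :=
  let c := assessments.foldl bgdTally (0, 0, 0)
  let text := if gate_result == "PASS" then
      "All CMMC Level " ++ (PySem.Int.toStr level ++ " practices are either met, partially met, not applicable, or not yet assessed. The system meets the minimum gate criteria for CMMC certification readiness.")
    else
      "**" ++ (PySem.Int.toStr c.1 ++ " practice(s) have a status of not_met.** These must be remediated before CMMC certification can proceed.")
  let text := if c.2.1 != 0 then
      text ++ ("\n\n**Note:** " ++ (PySem.Int.toStr c.2.1 ++ " practice(s) are partially met. While these do not block the gate, they should be fully implemented prior to formal C3PAO assessment."))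
    else text
  let text := if c.2.2 != 0 then
      text ++ ("\n\n**Note:** " ++ (PySem.Int.toStr c.2.2 ++ " practice(s) have not been assessed. All practices must be evaluated before requesting formal assessment."))
    else text
  text

-- ===== PRECONDITION & SPEC =====
def Spec_build_gate_details_py (assessments : List (List (String × String))) (level : Int) (gate_result : String) (out : String) : Prop := out = build_gate_details_py_alt assessments level gate_result
instance (assessments : List (List (String × String))) (level : Int) (gate_result : String) (out : String) : Decidable (Spec_build_gate_details_py assessments level gate_result out) := by unfold Spec_build_gate_details_py; infer_instance

-- ===== CLAIM (what is proved, stated in full; the proofs are below) =====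
def Claim_equal_build_gate_details_py : Prop := ∀ (assessments : List (List (String × String))) (level : Int) (gate_result : String), Dom_build_gate_details_py assessments level gate_result → Spec_build_gate_details_py assessments level gate_result (build_gate_details_py assessments level gate_result)

-- ===== LEMMAS AND PROOFS =====

theorem pv_join1 (a : String) : PySem.Str.join "\n" [a] = a := by
  have h : (PySem.Str.join "\n" [a]).toList = a.toList := by
    simp [PySem.Str.join, PySem.Chars.join_singleton]
  exact String.toList_injective h

theorem pv_join2 (a b : String) : PySem.Str.join "\n" [a, b] = a ++ "\n" ++ b := by
  have h : (PySem.Str.join "\n" [a, b]).toList = (a ++ "\n" ++ b).toList := by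
    simp [PySem.Str.join, PySem.Chars.join_cons_cons, PySem.Chars.join_singleton]
  exact String.toList_injective h

theorem pv_join3 (a b c : String) : PySem.Str.join "\n" [a, b, c] = a ++ "\n" ++ b ++ "\n" ++ c := by
  have h : (PySem.Str.join "\n" [a, b, c]).toList = (a ++ "\n" ++ b ++ "\n" ++ c).toList := by
    simp [PySem.Str.join, PySem.Chars.join_cons_cons, PySem.Chars.join_singleton]
  exact String.toList_injective h

-- join's "\n" separator merges with the leading "\n" of a **Note:** line
theorem note_merge (x r : String) : x ++ "\n" ++ ("\n**Note:** " ++ r) = x ++ ("\n\n**Note:** " ++ r) := by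
  have h : ("\n" : String) ++ "\n**Note:** " = "\n\n**Note:** " := by decide
  rw [String.append_assoc (s₃ := "\n**Note:** " ++ r), ← String.append_assoc (s₁ := ("\n" : String)), h]

-- the single-pass tally computes exactly the three filter lengths
theorem bgdTally_spec (l : List (List (String × String))) (acc : Int × Int × Int) :
    l.foldl bgdTally acc =
      (acc.1 + Int.ofNat (l.filter (fun a => bgdStatus a == some "not_met")).length,
       acc.2.1 + Int.ofNat (l.filter (fun a => bgdStatus a == some "partially_met")).length,
       acc.2.2 + Int.ofNat (l.filter (fun a => bgdStatus a == some "not_assessed")).length) := by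
  induction l generalizing acc with
  | nil => simp
  | cons x xs ih =>
    rw [List.foldl_cons, ih]
    simp only [bgdTally, List.filter_cons]
    split_ifs with h1 h2 h3 <;> simp_all [Prod.ext_iff] <;> omega

theorem pv_len_zero {α : Type} (l : List α) : (Int.ofNat l.length = 0) ↔ l = [] := by
  simp [List.length_eq_zero_iff]

theorem build_gate_details_py_eq (assessments : List (List (String × String))) (level : Int) (gate_result : String) :
    build_gate_details_py assessments level gate_result = build_gate_details_py_alt assessments level gate_result := by
  simp only [build_gate_details_py, build_gate_details_py_alt]
  rw [bgdTally_spec]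
  simp only [zero_add, List.isEmpty_iff, bne_iff_ne, ne_eq, pv_len_zero, List.nil_append]
  split_ifs <;>
    (try simp only [List.cons_append, List.nil_append]) <;>
    first
      | rw [pv_join3, note_merge, note_merge]
      | rw [pv_join2, note_merge]
      | rw [pv_join1]

-- ===== VERDICT (by name: the statement is the Claim_ definition above) =====
theorem build_gate_details_py_spec : Claim_equal_build_gate_details_py := by
  intro assessments level gate_result _
  exact build_gate_details_py_eq assessments level gate_result
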